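-- pv_equiv track=rewrite | github.com/OOLebedenko/HW_algorythms | find_nonoverlapping_terms.py | find_nonovelapping_terms
-- ===== SOURCE A (Python) =====
-- def find_nonovelapping_terms(n):
--     k = 1
--     result = []
--     while n > 2 * k:
--         result.append(k)
--         n -= k
--         k += 1
--     else:
--         result.append(n)
--     return result
-- ===== SOURCE B (Python) =====
-- def find_nonovelapping_terms(n):
--     if n <= 0:
--         return [n]
--     # binary search for the largest m >= 0 with m*(m+3) < 2*n
--     # invariant: lo*(lo+3) < 2*n <= hi*(hi+3), 0 <= lo < hi
--     lo, hi = 0, n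
--     while hi - lo > 1:
--         mid = (lo + hi) // 2
--         if mid * (mid + 3) < 2 * n:
--             lo = mid
--         else:
--             hi = mid
--     return list(range(1, lo + 1)) + [n - lo * (lo + 1) // 2]
-- ===== Notes on version B (the rewrite author's own statement) =====
-- stated objective: alternative
-- what changed: Replaces A's term-by-term greedy subtraction loop with a binary search for the largest m with m*(m+3) < 2n, then emits range(1, m+1) plus the exact remainder n - m*(m+1)//2.
import Mathlib
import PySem

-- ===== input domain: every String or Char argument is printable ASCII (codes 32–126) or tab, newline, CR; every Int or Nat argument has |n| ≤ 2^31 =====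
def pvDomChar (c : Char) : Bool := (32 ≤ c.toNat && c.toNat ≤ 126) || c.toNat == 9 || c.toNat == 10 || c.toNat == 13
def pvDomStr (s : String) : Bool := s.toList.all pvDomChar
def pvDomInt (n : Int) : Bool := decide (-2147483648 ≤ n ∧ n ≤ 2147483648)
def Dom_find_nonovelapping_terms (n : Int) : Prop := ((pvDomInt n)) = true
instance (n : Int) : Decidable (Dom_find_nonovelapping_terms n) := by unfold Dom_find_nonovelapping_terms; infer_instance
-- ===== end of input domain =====

-- B replaces A's greedy subtraction loop by a binary search for the number of full
-- terms plus a range and an exact remainder (objective: alternative algorithm, same cost).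


-- ===== PORT A =====
-- while n > 2*k: result.append(k); n -= k; k += 1  /  else: result.append(n)
def pvALoop (n k : Int) : List Int :=
  if n > 2 * k then k :: pvALoop (n - k) (k + 1) else [n]
termination_by ((1 - k).toNat, n.toNat)
decreasing_by
  simp only [Prod.lex_iff]
  omega

def find_nonovelapping_terms (n : Int) : List Int := pvALoop n 1

-- ===== PORT B =====
-- binary search: invariant lo*(lo+3) < 2*n <= hi*(hi+3), returns lo when hi-lo <= 1
def pvBSearch (n lo hi : Int) : Int :=
  if hi - lo > 1 then
    let mid := PySem.Int.floordiv (lo + hi) 2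
    if mid * (mid + 3) < 2 * n then pvBSearch n mid hi else pvBSearch n lo mid
  else lo
termination_by (hi - lo).toNat
decreasing_by
  · have h := PySem.Int.floordiv_two_mid_bounds (lo := lo) (hi := hi) (by omega)
    have h2 : PySem.Int.floordiv (lo + hi) 2 = (lo + hi) / 2 :=
      PySem.Int.floordiv_eq_ediv_of_pos (by omega)
    omega
  · have h := PySem.Int.floordiv_two_mid_bounds (lo := lo) (hi := hi) (by omega)
    have h2 : PySem.Int.floordiv (lo + hi) 2 = (lo + hi) / 2 :=
      PySem.Int.floordiv_eq_ediv_of_pos (by omega)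
    omega

def find_nonovelapping_terms_alt (n : Int) : List Int :=
  if n ≤ 0 then [n]
  else
    let lo := pvBSearch n 0 n
    PySem.List.pyRange 1 (lo + 1) 1 ++ [n - PySem.Int.floordiv (lo * (lo + 1)) 2]

-- ===== PRECONDITION & SPEC =====
def Spec_find_nonovelapping_terms (n : Int) (out : List Int) : Prop := out = find_nonovelapping_terms_alt n
instance (n : Int) (out : List Int) : Decidable (Spec_find_nonovelapping_terms n out) := by unfold Spec_find_nonovelapping_terms; infer_instance

-- ===== CLAIM (what is proved, stated in full; the proofs are below) =====
def Claim_equal_find_nonovelapping_terms : Prop := ∀ (n : Int), Dom_find_nonovelapping_terms n → Spec_find_nonovelapping_terms n (find_nonovelapping_terms n)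

-- ===== LEMMAS AND PROOFS =====

-- A's loop unrolled m times: if iterations k..k+m-1 all run (guard j*(j+3) < 2*N in
-- terms of the ORIGINAL n = N) and iteration k+m does not, the result is the range
-- k..k+m-1 followed by the remainder.
lemma pvALoop_eq (m : Nat) : ∀ (N n k : Int), 1 ≤ k → 2 * n = 2 * N - (k - 1) * k →
    (∀ j : Int, k ≤ j → j < k + (m : Int) → j * (j + 3) < 2 * N) →
    ¬ ((k + (m : Int)) * ((k + (m : Int)) + 3) < 2 * N) →
    pvALoop n k =
      PySem.List.pyRange k (k + (m : Int)) 1 ++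
        [N - PySem.Int.floordiv ((k + (m : Int) - 1) * (k + (m : Int))) 2] := by
  induction m with
  | zero =>
    intro N n k hk hn _ hstop
    simp only [Nat.cast_zero, add_zero] at hstop ⊢
    have hguard : ¬ (n > 2 * k) := by
      intro hg; apply hstop; nlinarith
    rw [pvALoop.eq_def, if_neg hguard]
    have h1 : PySem.List.pyRange k k 1 = [] :=
      PySem.List.pyRange_one_eq_nil le_rfl
    have h2 : PySem.Int.floordiv ((k - 1) * k) 2 = N - n := by
      have he : (k - 1) * k = (N - n) * 2 := by linarith
      rw [he, PySem.Int.floordiv_eq_ediv_of_pos (by omega), Int.mul_ediv_cancel _ (by omega)]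
    rw [h1, h2]; simp
  | succ m ih =>
    intro N n k hk hn hrun hstop
    have hrunk : k * (k + 3) < 2 * N := hrun k le_rfl (by omega)
    have hguard : n > 2 * k := by nlinarith
    rw [pvALoop.eq_def, if_pos hguard]
    have ihh := ih N (n - k) (k + 1) (by omega) (by push_cast; linarith)
      (fun j h1 h2 => hrun j (by omega) (by push_cast at h2 ⊢; omega))
      (by push_cast at hstop ⊢; intro h; exact hstop (by linarith))
    rw [ihh]
    have hlt : k < k + ((m : Int) + 1) := by omega
    have hcons : PySem.List.pyRange k (k + ((m:Nat)+1 : Nat)) 1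
        = k :: PySem.List.pyRange (k + 1) (k + 1 + (m : Int)) 1 := by
      rw [PySem.List.pyRange_one_cons (by omega)]
      congr 1; push_cast; ring_nf
    rw [hcons]
    simp only [List.cons_append]
    congr 2
    push_cast; ring_nf

-- the binary search returns lo with lo*(lo+3) < 2*n and ¬((lo+1)*(lo+4) < 2*n),
-- given the initial invariant
lemma pvBSearch_spec : ∀ (n lo hi : Int), 0 ≤ lo → lo < hi →
    lo * (lo + 3) < 2 * n → ¬ (hi * (hi + 3) < 2 * n) →
    0 ≤ pvBSearch n lo hi ∧ pvBSearch n lo hi * (pvBSearch n lo hi + 3) < 2 * n ∧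
      ¬ ((pvBSearch n lo hi + 1) * ((pvBSearch n lo hi + 1) + 3) < 2 * n) := by
  intro n lo hi
  induction lo, hi using pvBSearch.induct (n := n) with
  | case1 lo hi hgt mid hmid ih =>
    intro h0 hlt hlo hhi
    have hb := PySem.Int.floordiv_two_mid_bounds (lo := lo) (hi := hi) (by omega)
    have h2 : PySem.Int.floordiv (lo + hi) 2 = (lo + hi) / 2 :=
      PySem.Int.floordiv_eq_ediv_of_pos (by omega)
    rw [pvBSearch.eq_def, if_pos hgt]
    simp only []
    rw [if_pos hmid]
    exact ih (by omega) (by omega) hmid hhi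
  | case2 lo hi hgt mid hmid ih =>
    intro h0 hlt hlo hhi
    have hb := PySem.Int.floordiv_two_mid_bounds (lo := lo) (hi := hi) (by omega)
    have h2 : PySem.Int.floordiv (lo + hi) 2 = (lo + hi) / 2 :=
      PySem.Int.floordiv_eq_ediv_of_pos (by omega)
    rw [pvBSearch.eq_def, if_pos hgt]
    simp only []
    rw [if_neg hmid]
    exact ih h0 (by omega) hlo hmid
  | case3 lo hi hle =>
    intro h0 hlt hlo hhi
    rw [pvBSearch.eq_def, if_neg hle]
    have : hi = lo + 1 := by omega
    subst this
    exact ⟨h0, hlo, hhi⟩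

-- ===== VERDICT (by name: the statement is the Claim_ definition above) =====
theorem find_nonovelapping_terms_spec : Claim_equal_find_nonovelapping_terms := by
  intro n _
  unfold Spec_find_nonovelapping_terms find_nonovelapping_terms find_nonovelapping_terms_alt
  by_cases hn : n ≤ 0
  · rw [if_pos hn, pvALoop.eq_def, if_neg (by omega)]
  · rw [if_neg hn]
    push Not at hn
    obtain ⟨hr0, hr1, hr2⟩ := pvBSearch_spec n 0 n (le_refl 0) hn
      (by norm_num; omega) (by intro h; nlinarith)
    set r := pvBSearch n 0 n with hr
    obtain ⟨m, hm⟩ : ∃ m : Nat, (m : Int) = r := ⟨r.toNat, by omega⟩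
    have := pvALoop_eq m n n 1 le_rfl (by ring)
      (fun j h1 h2 => by
        rw [hm] at h2
        nlinarith)
      (by rw [show (1 : Int) + (m : Int) = r + 1 by omega]; exact hr2)
    rw [this]
    congr 2
    · omega
    · congr 1; rw [hm]; ring_nf
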